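-- pv_equiv track=rewrite | github.com/kodewilliams/college | Python/Intro to CS/get_even_occurrences.py | GetEvenNumOccurrences
-- ===== SOURCE A (Python) =====
-- def GetEvenNumOccurrences(values):
--     counts = {}
--     evens = []
--
--     # Initialize value counts as 0
--     for item in values:
--         counts[item] = 0
--
--     # Count the occurrences of each value
--     for value in counts:
--         for num in values:
--             if num == value:
--                 counts[value] += 1
--
--     # Add value to list if the count is divisible by 2
--     for key in counts:
--         if counts[key] % 2 == 0:
--             evens.append(key)
--
--     return evens
-- ===== SOURCE B (Python) =====
-- def GetEvenNumOccurrences(values):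
--     odd = set()
--     order = []
--     for v in values:
--         if v in odd:
--             odd.discard(v)
--         else:
--             odd.add(v)
--         if v not in order:
--             order.append(v)
--     return [v for v in order if v not in odd]
-- ===== Notes on version B (the rewrite author's own statement) =====
-- stated objective: faster
-- what changed: Replaces the dict-of-counts with a rescan-per-distinct-value (for each key, scan the whole list again) by a single pass maintaining a parity-toggle set plus a first-occurrence order list, then filtering the order list by the parity set.
import Mathlib
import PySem

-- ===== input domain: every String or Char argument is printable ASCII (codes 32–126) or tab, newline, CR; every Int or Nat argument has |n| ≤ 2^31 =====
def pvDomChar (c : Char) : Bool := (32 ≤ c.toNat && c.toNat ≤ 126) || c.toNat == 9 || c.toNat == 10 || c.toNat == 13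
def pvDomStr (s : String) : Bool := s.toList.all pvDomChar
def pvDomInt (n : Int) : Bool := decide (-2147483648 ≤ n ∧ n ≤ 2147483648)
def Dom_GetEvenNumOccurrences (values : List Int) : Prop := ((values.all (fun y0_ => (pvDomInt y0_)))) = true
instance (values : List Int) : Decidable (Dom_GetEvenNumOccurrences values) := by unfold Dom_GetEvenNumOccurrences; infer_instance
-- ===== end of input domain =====

-- B replaces A's dict-of-counts with rescans per key by a one-pass parity-toggle set
-- plus a first-occurrence order list, filtered at the end (objective: faster, constant factor).

-- ===== PORT A =====
def GetEvenNumOccurrences (values : List Int) : List Int :=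
  -- counts = {}; for item in values: counts[item] = 0
  let counts : PySem.Dict Int Int :=
    values.foldl (fun d item => d.insert item 0) PySem.Dict.empty
  -- for value in counts: for num in values: if num == value: counts[value] += 1
  let counts2 : PySem.Dict Int Int :=
    counts.keys.foldl (fun d value =>
      values.foldl (fun d num => if num == value then d.modify value 0 (· + 1) else d) d) counts
  -- for key in counts: if counts[key] % 2 == 0: evens.append(key)
  counts2.keys.foldl (fun evens key =>
    if counts2.getD key 0 % 2 == 0 then evens ++ [key] else evens) []

-- ===== PORT B =====
def GetEvenNumOccurrences_alt (values : List Int) : List Int :=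
  let st : PySem.Set Int × List Int :=
    values.foldl (fun st v =>
      ((if PySem.Set.contains st.1 v then PySem.Set.discard st.1 v else PySem.Set.add st.1 v),
       (if st.2.contains v then st.2 else st.2 ++ [v])))
      (PySem.Set.empty, [])
  st.2.filter (fun v => !(PySem.Set.contains st.1 v))

-- ===== PRECONDITION & SPEC =====
def Spec_GetEvenNumOccurrences (values : List Int) (out : List Int) : Prop := out = GetEvenNumOccurrences_alt values
instance (values : List Int) (out : List Int) : Decidable (Spec_GetEvenNumOccurrences values out) := by unfold Spec_GetEvenNumOccurrences; infer_instance

-- ===== CLAIM (what is proved, stated in full; the proofs are below) =====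
def Claim_equal_GetEvenNumOccurrences : Prop := ∀ (values : List Int), Dom_GetEvenNumOccurrences values → Spec_GetEvenNumOccurrences values (GetEvenNumOccurrences values)

-- ===== LEMMAS AND PROOFS =====

lemma contains_decide (s : PySem.Set Int) (k : Int) :
    PySem.Set.contains s k = decide (k ∈ s) := by
  rw [PySem.Set.contains_eq_listContains]; simp

-- inner counting loop of A, restricted to the matching occurrences
lemma innerA_eq_filter (values : List Int) (value : Int) (d : PySem.Dict Int Int) :
    values.foldl (fun d num => if num == value then d.modify value 0 (· + 1) else d) d
      = (values.filter (fun num => num == value)).foldl (fun d num => d.modify num 0 (· + 1)) d := by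
  induction values generalizing d with
  | nil => rfl
  | cons a l ih =>
      simp only [List.foldl_cons, List.filter_cons]
      by_cases h : a = value
      · subst h
        simp only [beq_self_eq_true, if_true, List.foldl_cons]
        exact ih _
      · have hb : (a == value) = false := by simp [h]
        simp only [hb, Bool.false_eq_true, if_false]
        exact ih _

lemma innerA_getD (values : List Int) (value k : Int) (d : PySem.Dict Int Int) :
    (values.foldl (fun d num => if num == value then d.modify value 0 (· + 1) else d) d).getD k 0
      = d.getD k 0 + (if k = value then (values.count value : Int) else 0) := by
  rw [innerA_eq_filter, PySem.Dict.getD_foldl_modify_add_one]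
  by_cases h : k = value
  · subst h; simp [List.count_filter]
  · have h0 : (values.filter (fun num => num == value)).count k = 0 := by
      rw [List.count_eq_zero]
      intro hc
      rcases List.mem_filter.mp hc with ⟨_, heq⟩
      exact h (by simpa using heq)
    simp [h0, h]

lemma innerA_keys (values : List Int) (value : Int) (d : PySem.Dict Int Int)
    (hv : value ∈ d.keys) :
    (values.foldl (fun d num => if num == value then d.modify value 0 (· + 1) else d) d).keys
      = d.keys := by
  induction values generalizing d with
  | nil => rfl
  | cons a l ih =>
      simp only [List.foldl_cons]
      by_cases h : a = value
      · subst h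
        have hc : d.contains a = true := (PySem.Dict.contains_iff_mem_keys d a).mpr hv
        have hk : (d.modify a 0 (· + 1)).keys = d.keys := by
          rw [PySem.Dict.keys_modify, PySem.Dict.keys_insert_of_contains d _ hc]
        simp only [beq_self_eq_true, if_true]
        rw [ih (d.modify a 0 (· + 1)) (by rw [hk]; exact hv), hk]
      · have hb : (a == value) = false := by simp [h]
        simp only [hb, Bool.false_eq_true, if_false]
        exact ih d hv

-- outer loop of A: each processed key gets its occurrence count added
lemma outerA_getD (values : List Int) (ks : List Int) (k : Int) (d : PySem.Dict Int Int)
    (hnd : ks.Nodup) (hks : ∀ x ∈ ks, x ∈ d.keys) :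
    (ks.foldl (fun d value =>
        values.foldl (fun d num => if num == value then d.modify value 0 (· + 1) else d) d) d).getD k 0
      = d.getD k 0 + (if k ∈ ks then (values.count k : Int) else 0) := by
  induction ks generalizing d with
  | nil => simp
  | cons a l ih =>
      simp only [List.foldl_cons]
      have hkeys : (values.foldl (fun d num => if num == a then d.modify a 0 (· + 1) else d) d).keys = d.keys :=
        innerA_keys values a d (hks a (by simp))
      rw [ih _ hnd.of_cons (fun x hx => by rw [hkeys]; exact hks x (by simp [hx]))]
      rw [innerA_getD]
      rcases List.nodup_cons.mp hnd with ⟨ha, _⟩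
      by_cases h1 : k = a
      · subst h1; simp [ha]
      · simp [h1, List.mem_cons]

lemma outerA_keys (values : List Int) (ks : List Int) (d : PySem.Dict Int Int)
    (hks : ∀ x ∈ ks, x ∈ d.keys) :
    (ks.foldl (fun d value =>
        values.foldl (fun d num => if num == value then d.modify value 0 (· + 1) else d) d) d).keys
      = d.keys := by
  induction ks generalizing d with
  | nil => rfl
  | cons a l ih =>
      simp only [List.foldl_cons]
      have hkeys : (values.foldl (fun d num => if num == a then d.modify a 0 (· + 1) else d) d).keys = d.keys :=
        innerA_keys values a d (hks a (by simp))
      rw [ih _ (fun x hx => by rw [hkeys]; exact hks x (by simp [hx])), hkeys]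

-- init loop of A: keys are the distinct values in first-occurrence order, all counts 0
lemma initA_keys (values : List Int) :
    (values.foldl (fun d item => (d : PySem.Dict Int Int).insert item 0) PySem.Dict.empty).keys
      = PySem.Set.ofList values := by
  rw [PySem.Dict.keys_foldl_insert]
  simp [PySem.Set.update, PySem.Set.ofList_eq_foldl]

lemma initA_getD (values : List Int) (k : Int) :
    (values.foldl (fun d item => (d : PySem.Dict Int Int).insert item 0) PySem.Dict.empty).getD k 0 = 0 := by
  suffices h : ∀ d : PySem.Dict Int Int, d.getD k 0 = 0 →
      (values.foldl (fun d item => d.insert item 0) d).getD k 0 = 0 by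
    exact h _ (by simp)
  induction values with
  | nil => intro d hd; simpa using hd
  | cons a l ih =>
      intro d hd
      refine ih _ ?_
      by_cases h : k = a
      · subst h; simp
      · rw [PySem.Dict.getD_insert_of_ne d 0 0 h]; exact hd

-- A computed in closed form
lemma A_closed (values : List Int) :
    GetEvenNumOccurrences values
      = (PySem.Set.ofList values).filter (fun k => (values.count k : Int) % 2 == 0) := by
  simp only [GetEvenNumOccurrences]
  generalize hd0 : values.foldl (fun d item =>
      (d : PySem.Dict Int Int).insert item 0) PySem.Dict.empty = d0
  have hkeys0 : d0.keys = PySem.Set.ofList values := by rw [← hd0]; exact initA_keys values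
  have hgetD0 : ∀ k : Int, d0.getD k 0 = 0 := by intro k; rw [← hd0]; exact initA_getD values k
  have hself : ∀ x ∈ d0.keys, x ∈ d0.keys := fun x hx => hx
  have hkeys2 : (d0.keys.foldl (fun d value =>
      values.foldl (fun d num => if num == value then d.modify value 0 (· + 1) else d) d) d0).keys
      = d0.keys := outerA_keys values d0.keys d0 hself
  rw [PySem.List.foldl_append_if_eq_filter, hkeys2, hkeys0]
  simp only [List.nil_append]
  apply List.filter_congr
  intro k hk
  have hnd : (PySem.Set.ofList values : List Int).Nodup := PySem.Set.nodup_ofList values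
  have hks : ∀ x ∈ (PySem.Set.ofList values : List Int), x ∈ d0.keys := by
    intro x hx; rw [hkeys0]; exact hx
  rw [outerA_getD values _ k d0 hnd hks, hgetD0]
  simp [hk]

-- B's toggle set holds exactly the odd-count values
lemma B_odd (values : List Int) (s : PySem.Set Int) (o : List Int) (k : Int) :
    PySem.Set.contains
      (values.foldl (fun st v =>
        ((if PySem.Set.contains st.1 v then PySem.Set.discard st.1 v else PySem.Set.add st.1 v),
         (if st.2.contains v then st.2 else st.2 ++ [v]))) (s, o)).1 k
      = xor (PySem.Set.contains s k) (values.count k % 2 == 1) := by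
  induction values generalizing s o with
  | nil => simp
  | cons a l ih =>
      simp only [List.foldl_cons]
      rw [ih]
      have hstep : PySem.Set.contains
          (if PySem.Set.contains s a then PySem.Set.discard s a else PySem.Set.add s a) k
          = xor (PySem.Set.contains s k) (k == a) := by
        by_cases ha : a ∈ s
        · rw [if_pos ((PySem.Set.contains_iff s a).mpr ha)]
          rw [contains_decide, contains_decide]
          by_cases hk : k = a
          · subst hk; simp [PySem.Set.mem_discard, ha]
          · have hb : (k == a) = false := by simp [hk]
            simp [PySem.Set.mem_discard, hk, hb]
        · rw [if_neg (by simp only [PySem.Set.contains_iff]; exact ha)]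
          rw [contains_decide, contains_decide]
          by_cases hk : k = a
          · subst hk; simp [ha]
          · have hb : (k == a) = false := by simp [hk]
            simp [hk, hb]
      rw [hstep]
      by_cases hk : k = a
      · subst hk
        simp only [List.count_cons_self, beq_self_eq_true]
        rcases Nat.even_or_odd (l.count k) with he | ho
        · have h2 : l.count k % 2 = 0 := Nat.even_iff.mp he
          have h3 : (l.count k + 1) % 2 = 1 := by omega
          simp [h2, h3, Bool.xor_comm]
        · have h2 : l.count k % 2 = 1 := Nat.odd_iff.mp ho
          have h3 : (l.count k + 1) % 2 = 0 := by omega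
          simp [h2, h3, Bool.xor_comm]
      · have hb : (k == a) = false := by simp [hk]
        have hak : ¬a = k := fun h => hk h.symm
        simp [hb, hak]

-- B's order list is set(values)-style ordered dedup
lemma B_order (values : List Int) (s : PySem.Set Int) (o : List Int) :
    (values.foldl (fun st v =>
        ((if PySem.Set.contains st.1 v then PySem.Set.discard st.1 v else PySem.Set.add st.1 v),
         (if st.2.contains v then st.2 else st.2 ++ [v]))) (s, o)).2
      = values.foldl PySem.Set.add o := by
  induction values generalizing s o with
  | nil => rfl
  | cons a l ih =>
      simp only [List.foldl_cons]
      rw [ih]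
      rfl

-- B computed in closed form
lemma B_closed (values : List Int) :
    GetEvenNumOccurrences_alt values
      = (PySem.Set.ofList values).filter (fun k => !(values.count k % 2 == 1)) := by
  simp only [GetEvenNumOccurrences_alt]
  rw [B_order, ← PySem.Set.ofList_eq_foldl]
  apply List.filter_congr
  intro k hk
  rw [B_odd]
  simp

-- ===== VERDICT (by name: the statement is the Claim_ definition above) =====
theorem GetEvenNumOccurrences_spec : Claim_equal_GetEvenNumOccurrences := by
  intro values _
  unfold Spec_GetEvenNumOccurrences
  rw [A_closed, B_closed]
  apply List.filter_congr
  intro k _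
  have hcast : ((values.count k : Int)) % 2 = ((values.count k % 2 : Nat) : Int) := by
    push_cast; omega
  rcases Nat.even_or_odd (values.count k) with he | ho
  · have h2 : values.count k % 2 = 0 := Nat.even_iff.mp he
    simp [hcast, h2]
  · have h2 : values.count k % 2 = 1 := Nat.odd_iff.mp ho
    simp [hcast, h2]
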